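-- pv_equiv track=rewrite | github.com/Clear-Love/leetcode | lqb/神奇数.py | calc
-- ===== SOURCE A (Python) =====
-- from functools import lru_cache
--
-- MOD = 998244353
--
-- def calc(num: int) -> int:
--     s = str(num)
--     n = len(s)
--     @lru_cache(None)
--     def dfs(i: int, preSum: int, isLimit: bool, isNum: bool) -> int:
--         end = int(s[i]) if isLimit else 9
--         # 最后一位
--         if i == n-1:
--             return sum(1 for i in range(1, end+1) if preSum%i == 0)
--         start = 0 if isNum else 1
--         res = 0
--         if not isNum:
--             # 忽略这一位, 少一位不再限制，
--             res += dfs(i+1, preSum, False, isLimit)%MOD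
--         for x in range(start, end+1):
--             res += dfs(i+1, preSum+x, isLimit and x == end, True)%MOD
--         return res%MOD
--     return dfs(0, 0, True, False)
-- ===== SOURCE B (Python) =====
-- MOD = 998244353
--
-- def calc(num: int) -> int:
--     # Iterative bottom-up digit DP: explicit table per position instead of memoized recursion.
--     s = str(num)
--     n = len(s)
--     digits = [int(c) for c in s]
--
--     def cell(i, nxt, preSum, isLimit, isNum):
--         end = digits[i] if isLimit else 9
--         if i == n - 1:
--             return sum(1 for d in range(1, end + 1) if preSum % d == 0)
--         start = 0 if isNum else 1
--         res = 0
--         if not isNum: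
--             res += nxt[(preSum, False, isLimit)] % MOD
--         for x in range(start, end + 1):
--             res += nxt[(preSum + x, isLimit and x == end, True)] % MOD
--         return res % MOD
--
--     nxt = {}
--     for i in reversed(range(n)):
--         nxt = {(ps, l, m): cell(i, nxt, ps, l, m)
--                for ps in range(9 * i + 1)
--                for l in (False, True)
--                for m in (False, True)}
--     return nxt[(0, True, False)]
-- ===== Notes on version B (the rewrite author's own statement) =====
-- stated objective: alternative
-- what changed: Replaces the memoized top-down recursion (lru_cache dfs) by an iterative bottom-up digit DP that builds an explicit table per position from the last digit backwards, with the same state space (position, prefix sum, isLimit, isNum) and identical transitions.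
import Mathlib
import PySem

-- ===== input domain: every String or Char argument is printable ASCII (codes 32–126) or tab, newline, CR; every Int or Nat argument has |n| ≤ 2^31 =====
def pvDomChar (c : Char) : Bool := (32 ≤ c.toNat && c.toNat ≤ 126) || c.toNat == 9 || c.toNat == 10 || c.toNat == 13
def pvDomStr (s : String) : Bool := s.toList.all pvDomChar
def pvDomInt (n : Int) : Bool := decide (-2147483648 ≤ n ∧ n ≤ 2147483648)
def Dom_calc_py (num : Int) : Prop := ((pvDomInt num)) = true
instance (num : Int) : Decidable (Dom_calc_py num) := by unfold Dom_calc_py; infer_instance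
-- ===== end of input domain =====

-- B replaces A's memoized top-down recursion by an iterative bottom-up table over the digit
-- positions (objective: alternative decomposition, same asymptotic cost); return values only.

def pvMOD : Int := 998244353

-- int(s[i]) on a one-character string; exact for the digit characters reached under Pre_.
def pvCharInt (c : Char) : Int := (PySem.Int.ofChars? [c]).getD 0

-- ===== PORT A =====
-- A's dfs with its lru_cache: the cache is threaded explicitly as a PySem.Dict keyed by the
-- call arguments (i, preSum, isLimit, isNum); fuel = n - i makes the recursion structural.
def pvDfsA (digits : List Int) (n : Nat) :
    Nat → Nat → Int → Bool → Bool → PySem.Dict (Nat × Int × Bool × Bool) Int →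
    Int × PySem.Dict (Nat × Int × Bool × Bool) Int
  | 0, _, _, _, _, memo => (0, memo)   -- fuel exhausted: never reached (fuel = n - i ≥ 1)
  | fuel+1, i, preSum, isLimit, isNum, memo =>
    match memo.get? (i, preSum, isLimit, isNum) with
    | some v => (v, memo)
    | none =>
      let e : Int := if isLimit then digits.getD i 0 else 9
      if i = n - 1 then
        let r := (PySem.List.pyRange 1 (e + 1)).foldl
          (fun acc d => if PySem.Int.mod preSum d == 0 then acc + 1 else acc) 0
        (r, memo.insert (i, preSum, isLimit, isNum) r)
      else
        let start : Int := if isNum then 0 else 1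
        let p0 : Int × PySem.Dict (Nat × Int × Bool × Bool) Int :=
          if !isNum then
            let r := pvDfsA digits n fuel (i+1) preSum false isLimit memo
            (PySem.Int.mod r.1 pvMOD, r.2)
          else (0, memo)
        let p := (PySem.List.pyRange start (e + 1)).foldl
          (fun acc x =>
            let r := pvDfsA digits n fuel (i+1) (preSum + x) (isLimit && x == e) true acc.2
            (acc.1 + PySem.Int.mod r.1 pvMOD, r.2)) p0
        let r := PySem.Int.mod p.1 pvMOD
        (r, p.2.insert (i, preSum, isLimit, isNum) r)

def calc_py (num : Int) : Int :=
  let s := PySem.Int.toStr num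
  let digits := s.toList.map pvCharInt
  let n := s.toList.length
  (pvDfsA digits n n 0 0 true false PySem.Dict.empty).1

-- ===== PORT B =====
-- one cell of the DP table: B's `cell(i, nxt, preSum, isLimit, isNum)`
def pvCell (digits : List Int) (n : Nat) (i : Nat) (nxt : PySem.Dict (Int × Bool × Bool) Int)
    (preSum : Int) (isLimit isNum : Bool) : Int :=
  let e : Int := if isLimit then digits.getD i 0 else 9
  if i = n - 1 then
    (PySem.List.pyRange 1 (e + 1)).foldl
      (fun acc d => if PySem.Int.mod preSum d == 0 then acc + 1 else acc) 0
  else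
    let start : Int := if isNum then 0 else 1
    -- nxt[(…)] : the key is always present when the table was built for position i+1
    let res0 : Int := if !isNum then PySem.Int.mod (nxt.getD (preSum, false, isLimit) 0) pvMOD else 0
    let res := (PySem.List.pyRange start (e + 1)).foldl
      (fun acc x => acc + PySem.Int.mod (nxt.getD (preSum + x, isLimit && x == e, true) 0) pvMOD) res0
    PySem.Int.mod res pvMOD

-- the key set of the level-i table: (ps, l, m) for ps in range(9*i+1), l, m booleans
def pvKeys (i : Nat) : List (Int × Bool × Bool) :=
  (PySem.List.pyRange 0 (9 * (i : Int) + 1)).flatMap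
    (fun ps => [false, true].flatMap (fun l => [false, true].map (fun m => (ps, l, m))))

-- the dict comprehension building the level-i table from the level-(i+1) table
def pvLevel (digits : List Int) (n : Nat) (i : Nat)
    (nxt : PySem.Dict (Int × Bool × Bool) Int) : PySem.Dict (Int × Bool × Bool) Int :=
  (pvKeys i).foldl (fun d k => d.insert k (pvCell digits n i nxt k.1 k.2.1 k.2.2)) PySem.Dict.empty

def calc_py_alt (num : Int) : Int :=
  let s := PySem.Int.toStr num
  let digits := s.toList.map pvCharInt
  let n := s.toList.length
  let tbl := (List.range n).reverse.foldl (fun nxt i => pvLevel digits n i nxt) PySem.Dict.empty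
  tbl.getD (0, true, false) 0

-- ===== PRECONDITION & SPEC =====
-- Pre_ excludes negative num, on which A (and B) raise ValueError at int(s[i]) / int(c) for '-'.
def Pre_calc_py (num : Int) : Prop := 0 ≤ num
instance (num : Int) : Decidable (Pre_calc_py num) := by unfold Pre_calc_py; infer_instance
def pvWitness_calc_py : Int := 57

def Spec_calc_py (num : Int) (out : Int) : Prop := out = calc_py_alt num
instance (num : Int) (out : Int) : Decidable (Spec_calc_py num out) := by unfold Spec_calc_py; infer_instance

-- ===== CLAIM (what is proved, stated in full; the proofs are below) =====
def Claim_equal_calc_py : Prop := ∀ (num : Int), Dom_calc_py num → Pre_calc_py num → Spec_calc_py num (calc_py num)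

-- ===== LEMMAS AND PROOFS =====

-- the common reference function: the pure (uncached) recursion both programs compute
def pvG (digits : List Int) (n : Nat) : Nat → Nat → Int → Bool → Bool → Int
  | 0, _, _, _, _ => 0
  | fuel+1, i, preSum, isLimit, isNum =>
    let e : Int := if isLimit then digits.getD i 0 else 9
    if i = n - 1 then
      (PySem.List.pyRange 1 (e + 1)).foldl
        (fun acc d => if PySem.Int.mod preSum d == 0 then acc + 1 else acc) 0
    else
      let start : Int := if isNum then 0 else 1
      let res0 : Int := if !isNum then PySem.Int.mod (pvG digits n fuel (i+1) preSum false isLimit) pvMOD else 0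
      let res := (PySem.List.pyRange start (e + 1)).foldl
        (fun acc x => acc + PySem.Int.mod (pvG digits n fuel (i+1) (preSum + x) (isLimit && x == e) true) pvMOD) res0
      PySem.Int.mod res pvMOD

-- ---- A side: the memoized recursion computes pvG ----

def pvInv (digits : List Int) (n : Nat) (memo : PySem.Dict (Nat × Int × Bool × Bool) Int) : Prop :=
  ∀ j ps l m v, memo.get? (j, ps, l, m) = some v → v = pvG digits n (n - j) j ps l m

theorem pvInv_empty (digits : List Int) (n : Nat) : pvInv digits n PySem.Dict.empty := by
  intro j ps l m v h
  simp [PySem.Dict.get?_empty] at h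

theorem pvInv_insert (digits : List Int) (n : Nat) (memo) (hm : pvInv digits n memo)
    (i : Nat) (ps : Int) (l m : Bool) (r : Int) (hr : r = pvG digits n (n - i) i ps l m) :
    pvInv digits n (memo.insert (i, ps, l, m) r) := by
  intro j ps' l' m' v hv
  rw [PySem.Dict.get?_insert] at hv
  split at hv
  · rename_i heq
    obtain ⟨rfl, rfl, rfl, rfl⟩ : j = i ∧ ps' = ps ∧ l' = l ∧ m' = m := by simpa using heq
    cases hv; exact hr
  · exact hm _ _ _ _ _ hv

theorem pvFoldA (digits : List Int) (n : Nat) (f i : Nat) (ps : Int) (l : Bool) (e : Int)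
    (hrec : ∀ ps' l' m' memo, pvInv digits n memo →
      (pvDfsA digits n f (i+1) ps' l' m' memo).1 = pvG digits n f (i+1) ps' l' m' ∧
      pvInv digits n (pvDfsA digits n f (i+1) ps' l' m' memo).2) :
    ∀ (L : List Int) (acc : Int) (memo), pvInv digits n memo →
      (L.foldl (fun acc x =>
          (acc.1 + PySem.Int.mod (pvDfsA digits n f (i+1) (ps + x) (l && x == e) true acc.2).1 pvMOD,
           (pvDfsA digits n f (i+1) (ps + x) (l && x == e) true acc.2).2)) (acc, memo)).1 =
        L.foldl (fun a x => a + PySem.Int.mod (pvG digits n f (i+1) (ps + x) (l && x == e) true) pvMOD) acc ∧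
      pvInv digits n
        (L.foldl (fun acc x =>
          (acc.1 + PySem.Int.mod (pvDfsA digits n f (i+1) (ps + x) (l && x == e) true acc.2).1 pvMOD,
           (pvDfsA digits n f (i+1) (ps + x) (l && x == e) true acc.2).2)) (acc, memo)).2 := by
  intro L
  induction L with
  | nil => intro acc memo h; exact ⟨rfl, h⟩
  | cons x L ih =>
    intro acc memo h
    have h1 := hrec (ps + x) (l && x == e) true memo h
    simpa [List.foldl_cons, h1.1] using
      ih (acc + PySem.Int.mod (pvG digits n f (i+1) (ps + x) (l && x == e) true) pvMOD) _ h1.2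


theorem pvDfsA_correct (digits : List Int) (n : Nat) :
    ∀ (f i : Nat) (ps : Int) (l m : Bool) (memo), f = n - i → i < n → pvInv digits n memo →
      (pvDfsA digits n f i ps l m memo).1 = pvG digits n f i ps l m ∧
      pvInv digits n (pvDfsA digits n f i ps l m memo).2 := by
  intro f
  induction f with
  | zero => intro i ps l m memo hf hi _; omega
  | succ f ih =>
    intro i ps l m memo hf hi hm
    cases hget : memo.get? (i, ps, l, m) with
    | some v =>
      have hv := hm i ps l m v hget
      refine ⟨?_, ?_⟩ <;> simp only [pvDfsA, hget]
      · rw [hv, ← hf]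
      · exact hm
    | none =>
      by_cases hbase : i = n - 1
      · subst hbase
        refine ⟨?_, ?_⟩ <;> simp only [pvDfsA, hget]
        · conv_rhs => rw [pvG]
          simp
        · apply pvInv_insert digits n memo hm
          rw [← hf]
          conv_rhs => rw [pvG]
          simp
      · have hi1 : i + 1 < n := by omega
        have hf1 : f = n - (i+1) := by omega
        have hrec : ∀ ps' l' m' memo', pvInv digits n memo' →
            (pvDfsA digits n f (i+1) ps' l' m' memo').1 = pvG digits n f (i+1) ps' l' m' ∧
            pvInv digits n (pvDfsA digits n f (i+1) ps' l' m' memo').2 :=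
          fun ps' l' m' memo' hmm => ih (i+1) ps' l' m' memo' hf1 hi1 hmm


        cases m with
        | true =>
          have hfold := pvFoldA digits n f i ps l (if l then digits.getD i 0 else 9) hrec
            (PySem.List.pyRange 0 ((if l then digits.getD i 0 else 9) + 1)) 0 memo hm
          refine ⟨?_, ?_⟩ <;> simp only [pvDfsA, hget] <;> rw [if_neg hbase] <;>
            simp only [Bool.not_true, Bool.false_eq_true, if_true, if_false]
          · conv_rhs => rw [pvG]
            rw [if_neg hbase]
            simp only [Bool.not_true, Bool.false_eq_true, if_true, if_false]
            rw [hfold.1]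
          · apply pvInv_insert digits n _ hfold.2
            rw [← hf]
            conv_rhs => rw [pvG]
            rw [if_neg hbase]
            simp only [Bool.not_true, Bool.false_eq_true, if_true, if_false]
            rw [hfold.1]
        | false =>
          have h0 := hrec ps false l memo hm
          have hfold := pvFoldA digits n f i ps l (if l then digits.getD i 0 else 9) hrec
            (PySem.List.pyRange 1 ((if l then digits.getD i 0 else 9) + 1))
            (PySem.Int.mod (pvG digits n f (i+1) ps false l) pvMOD)
            (pvDfsA digits n f (i+1) ps false l memo).2 h0.2
          rw [← h0.1] at hfold
          refine ⟨?_, ?_⟩ <;> simp only [pvDfsA, hget] <;> rw [if_neg hbase] <;>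
            simp only [Bool.not_false, Bool.false_eq_true, if_true, if_false]
          · conv_rhs => rw [pvG]
            rw [if_neg hbase]
            simp only [Bool.not_false, Bool.false_eq_true, if_true, if_false]
            rw [hfold.1, h0.1]
          · apply pvInv_insert digits n _ hfold.2
            rw [← hf]
            conv_rhs => rw [pvG]
            rw [if_neg hbase]
            simp only [Bool.not_false, Bool.false_eq_true, if_true, if_false]
            rw [hfold.1, h0.1]

theorem calc_py_eq_pvG (num : Int) :
    0 < (PySem.Int.toStr num).toList.length →
    calc_py num = pvG ((PySem.Int.toStr num).toList.map pvCharInt) (PySem.Int.toStr num).toList.length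
      (PySem.Int.toStr num).toList.length 0 0 true false := by
  intro hn
  unfold calc_py
  exact (pvDfsA_correct _ _ _ 0 0 true false _ (by omega) hn (pvInv_empty _ _)).1

-- ---- B side: every cell of the level-i table equals pvG at fuel n - i ----

def pvInvB (digits : List Int) (n : Nat) (i : Nat) (d : PySem.Dict (Int × Bool × Bool) Int) : Prop :=
  ∀ ps l m, 0 ≤ ps → ps ≤ 9 * (i : Int) → d.getD (ps, l, m) 0 = pvG digits n (n - i) i ps l m

theorem getD_foldl_insert_cell (digits : List Int) (n i : Nat) (nxt : PySem.Dict (Int × Bool × Bool) Int) :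
    ∀ (L : List (Int × Bool × Bool)) (d : PySem.Dict (Int × Bool × Bool) Int) (k : Int × Bool × Bool) (dflt : Int),
      (L.foldl (fun d k => d.insert k (pvCell digits n i nxt k.1 k.2.1 k.2.2)) d).getD k dflt =
        if k ∈ L then pvCell digits n i nxt k.1 k.2.1 k.2.2 else d.getD k dflt := by
  intro L
  induction L with
  | nil => intro d k dflt; simp
  | cons a L ih =>
    intro d k dflt
    rw [List.foldl_cons, ih]
    by_cases hk : k ∈ L
    · simp [hk]
    · simp only [hk, if_false, List.mem_cons, or_false]
      rw [PySem.Dict.getD_insert]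
      by_cases he : k = a <;> simp [he]

theorem mem_pvKeys (i : Nat) (ps : Int) (l m : Bool) :
    (ps, l, m) ∈ pvKeys i ↔ 0 ≤ ps ∧ ps ≤ 9 * (i : Int) := by
  simp [pvKeys, PySem.List.mem_pyRange_one]
  constructor
  · rintro ⟨a, ⟨h1, h2⟩, hc⟩
    rcases hc with ⟨rfl, _, _⟩ | ⟨rfl, _, _⟩ | ⟨rfl, _, _⟩ | ⟨rfl, _, _⟩ <;> exact ⟨h1, h2⟩
  · rintro ⟨h1, h2⟩
    exact ⟨ps, ⟨h1, h2⟩, by cases l <;> cases m <;> simp⟩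

theorem pvDigit_getD (digits : List Int) (hd : ∀ d ∈ digits, 0 ≤ d ∧ d ≤ 9) (i : Nat) :
    0 ≤ digits.getD i 0 ∧ digits.getD i 0 ≤ 9 := by
  by_cases hlen : i < digits.length
  · rw [List.getD_eq_getElem digits 0 hlen]
    exact hd _ (List.getElem_mem hlen)
  · rw [List.getD_eq_default digits 0 (by omega)]
    norm_num

theorem pvCell_correct (digits : List Int) (n : Nat) (i : Nat)
    (hd : ∀ d ∈ digits, 0 ≤ d ∧ d ≤ 9) (hi : i < n)
    (nxt : PySem.Dict (Int × Bool × Bool) Int) (hnxt : pvInvB digits n (i+1) nxt)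
    (ps : Int) (l m : Bool) (hps0 : 0 ≤ ps) (hps9 : ps ≤ 9 * (i : Int)) :
    pvCell digits n i nxt ps l m = pvG digits n (n - i) i ps l m := by
  have hni : n - i = (n - (i+1)) + 1 := by omega
  rw [hni, pvCell, pvG]
  by_cases hbase : i = n - 1
  · simp only [hbase]
    simp
  · rw [if_neg hbase, if_neg hbase]
    dsimp only
    have he : 0 ≤ (if l then digits.getD i 0 else 9) ∧ (if l then digits.getD i 0 else 9) ≤ 9 := by
      cases l
      · norm_num
      · simpa using pvDigit_getD digits hd i
    have hstep : ∀ (acc x : Int), x ∈ PySem.List.pyRange (if m then (0:Int) else 1) ((if l then digits.getD i 0 else 9) + 1) →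
        acc + PySem.Int.mod (nxt.getD (ps + x, l && x == (if l then digits.getD i 0 else 9), true) 0) pvMOD =
        acc + PySem.Int.mod (pvG digits n (n - (i+1)) (i+1) (ps + x) (l && x == (if l then digits.getD i 0 else 9)) true) pvMOD := by
      intro acc x hx
      rw [PySem.List.mem_pyRange_one] at hx
      have hx0 : 0 ≤ x := le_trans (by cases m <;> norm_num) hx.1
      rw [hnxt (ps + x) _ true (by omega) (by push_cast; omega)]
    rw [PySem.List.foldl_congr_mem _ _ _ _ hstep]
    cases m
    · rw [show (!false) = true from rfl, if_pos rfl, if_pos rfl,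
        hnxt ps false l hps0 (by push_cast; omega)]
    · rfl

def pvDown (digits : List Int) (n : Nat) : Nat → PySem.Dict (Int × Bool × Bool) Int → PySem.Dict (Int × Bool × Bool) Int
  | 0, d => d
  | j+1, d => pvDown digits n j (pvLevel digits n j d)

theorem pvRevRange_fold (digits : List Int) (n : Nat) :
    ∀ (j : Nat) (d : PySem.Dict (Int × Bool × Bool) Int),
      (List.range j).reverse.foldl (fun nxt i => pvLevel digits n i nxt) d = pvDown digits n j d := by
  intro j
  induction j with
  | zero => intro d; simp [pvDown]
  | succ j ih =>
    intro d
    rw [List.range_succ, List.reverse_append, List.reverse_singleton, List.singleton_append,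
      List.foldl_cons, ih, pvDown]

theorem pvLevel_correct (digits : List Int) (n : Nat) (i : Nat)
    (hd : ∀ d ∈ digits, 0 ≤ d ∧ d ≤ 9) (hi : i < n)
    (nxt : PySem.Dict (Int × Bool × Bool) Int) (hnxt : pvInvB digits n (i+1) nxt) :
    pvInvB digits n i (pvLevel digits n i nxt) := by
  intro ps l m hps0 hps9
  unfold pvLevel
  rw [getD_foldl_insert_cell digits n i nxt,
    if_pos ((mem_pvKeys i ps l m).2 ⟨hps0, hps9⟩)]
  exact pvCell_correct digits n i hd hi nxt hnxt ps l m hps0 hps9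

theorem pvDown_correct (digits : List Int) (n : Nat)
    (hd : ∀ d ∈ digits, 0 ≤ d ∧ d ≤ 9) :
    ∀ (j : Nat) (d : PySem.Dict (Int × Bool × Bool) Int), j ≤ n → pvInvB digits n j d →
      pvInvB digits n 0 (pvDown digits n j d) := by
  intro j
  induction j with
  | zero => intro d _ h; exact h
  | succ j ih =>
    intro d hj h
    exact ih _ (by omega) (pvLevel_correct digits n j hd (by omega) d h)

theorem calc_py_alt_eq_pvG (num : Int)
    (hd : ∀ d ∈ (PySem.Int.toStr num).toList.map pvCharInt, 0 ≤ d ∧ d ≤ 9) :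
    calc_py_alt num = pvG ((PySem.Int.toStr num).toList.map pvCharInt) (PySem.Int.toStr num).toList.length
      (PySem.Int.toStr num).toList.length 0 0 true false := by
  unfold calc_py_alt
  dsimp only
  rw [pvRevRange_fold]
  have hb : pvInvB ((PySem.Int.toStr num).toList.map pvCharInt) (PySem.Int.toStr num).toList.length
      (PySem.Int.toStr num).toList.length PySem.Dict.empty := by
    intro ps l m _ _
    rw [Nat.sub_self]
    simp [PySem.Dict.getD_empty, pvG]
  have := pvDown_correct _ _ hd _ PySem.Dict.empty le_rfl hb 0 true false le_rfl (by norm_num)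
  simpa using this

-- ---- facts about str(num): nonempty, all decimal digits ----

theorem tdc_len : ∀ (fuel n : Nat) (ds : List Char),
    ds.length ≤ (Nat.toDigitsCore 10 fuel n ds).length := by
  intro fuel
  induction fuel with
  | zero => intro n ds; simp [Nat.toDigitsCore]
  | succ f ih =>
    intro n ds
    rw [Nat.toDigitsCore]
    by_cases h : n / 10 = 0
    · simp [h]
    · simp only [h, if_false]
      have := ih (n / 10) ((n % 10).digitChar :: ds)
      simp at this; omega

theorem tdc_mem : ∀ (fuel n : Nat) (ds : List Char) (c : Char),
    c ∈ Nat.toDigitsCore 10 fuel n ds → c ∈ ds ∨ ∃ k, k < 10 ∧ c = Nat.digitChar k := by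
  intro fuel
  induction fuel with
  | zero => intro n ds c h; simp [Nat.toDigitsCore] at h; exact Or.inl h
  | succ f ih =>
    intro n ds c h
    rw [Nat.toDigitsCore] at h
    by_cases hn : n / 10 = 0
    · simp [hn] at h
      rcases h with h | h
      · exact Or.inr ⟨n % 10, Nat.mod_lt _ (by norm_num), h⟩
      · exact Or.inl h
    · simp only [hn, if_false] at h
      rcases ih (n / 10) _ c h with h | h
      · rcases List.mem_cons.1 h with h | h
        · exact Or.inr ⟨n % 10, Nat.mod_lt _ (by norm_num), h⟩
        · exact Or.inl h
      · exact Or.inr h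

theorem digitChar_val (k : Nat) (hk : k < 10) :
    0 ≤ pvCharInt (Nat.digitChar k) ∧ pvCharInt (Nat.digitChar k) ≤ 9 := by
  interval_cases k <;> exact ⟨by decide, by decide⟩

theorem pvToChars_facts (num : Int) (h : 0 ≤ num) :
    1 ≤ (PySem.Int.toChars num).length ∧
      ∀ d ∈ (PySem.Int.toChars num).map pvCharInt, 0 ≤ d ∧ d ≤ 9 := by
  have hnn : ¬ num < 0 := not_lt.2 h
  simp only [PySem.Int.toChars, hnn, if_false, Nat.toDigits]
  constructor
  · have := tdc_len (num.toNat + 1) num.toNat []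
    rw [Nat.toDigitsCore] at *
    by_cases h10 : num.toNat / 10 = 0
    · simp [h10]
    · simp only [h10, if_false]
      have := tdc_len num.toNat (num.toNat / 10) ((num.toNat % 10).digitChar :: [])
      simp at this; omega
  · intro d hd
    simp only [List.mem_map] at hd
    obtain ⟨c, hc, rfl⟩ := hd
    rcases tdc_mem _ _ _ c hc with h | ⟨k, hk, rfl⟩
    · simp at h
    · exact digitChar_val k hk

-- ===== VERDICT (by name: the statement is the Claim_ definition above) =====
theorem calc_py_spec : Claim_equal_calc_py := by
  intro num _ hpre
  unfold Spec_calc_py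
  have hfacts := pvToChars_facts num hpre
  rw [← PySem.Int.toList_toStr] at hfacts
  rw [calc_py_eq_pvG num (by omega), calc_py_alt_eq_pvG num hfacts.2]
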